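-- pv_equiv track=rewrite | github.com/phatakshaunak/scaler_academy | DSA_Problem_Solving/Intro_Arrays/left_rotations.py | solve
-- ===== SOURCE A (Python) =====
-- def solve(A, B):
--     def rev(i,j,arr):
--         while i < j:
--             arr[i], arr[j] = arr[j], arr[i]
--             i += 1
--             j -= 1
--
--     for i in range(len(B)):
--         rot = B[i] % len(A)
--         B[i] = A.copy()
--         rev(0, len(A) - 1, B[i])
--         rev(0, len(A) - rot - 1, B[i])
--         rev(len(A) - rot, len(A) - 1, B[i])
--     return B
-- ===== SOURCE B (Python) =====
-- def solve(A, B):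
--     # Rotation by slice-concatenation; returns a new list (A mutates B in place,
--     # equivalence is about the return value only).
--     n = len(A)
--     return [A[b % n:] + A[:b % n] for b in B]
-- ===== Notes on version B (the rewrite author's own statement) =====
-- stated objective: simpler
-- what changed: Each rotated list is built directly as the slice-concatenation A[rot:] + A[:rot] in one comprehension, replacing A's copy-then-three-in-place-reversals scheme and its hand-written swap helper; return value only (A mutates its argument B in place, B does not).
import Mathlib
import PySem

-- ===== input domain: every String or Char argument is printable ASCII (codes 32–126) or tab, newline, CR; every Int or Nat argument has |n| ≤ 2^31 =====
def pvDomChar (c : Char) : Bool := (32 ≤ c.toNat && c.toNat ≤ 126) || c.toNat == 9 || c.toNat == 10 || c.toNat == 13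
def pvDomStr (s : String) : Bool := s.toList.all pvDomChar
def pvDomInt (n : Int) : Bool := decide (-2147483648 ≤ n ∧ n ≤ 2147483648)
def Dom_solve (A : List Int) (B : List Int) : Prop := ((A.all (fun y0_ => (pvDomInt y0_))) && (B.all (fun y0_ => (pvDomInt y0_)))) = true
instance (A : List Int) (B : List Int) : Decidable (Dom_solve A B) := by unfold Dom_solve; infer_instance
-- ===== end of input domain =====

-- B builds each rotation directly as the slice-concatenation A[rot:] + A[:rot],
-- replacing A's copy + three in-place reversals (objective: simpler).
-- Python A mutates its argument B in place; the equivalence proved here is about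
-- the return value only (Python B returns a fresh list).

-- ===== PORT A =====
-- 'def rev(i,j,arr): while i < j: swap arr[i], arr[j]; i += 1; j -= 1' — fuel-based
-- transliteration of the while loop; fuel = arr.length + 1 never runs out for the
-- calls solve makes (the loop body runs at most ⌈(j-i)/2⌉ ≤ arr.length times).
-- All indices the calls reach satisfy 0 ≤ i < j < arr.length, so getD/set with
-- .toNat are exact for Python's arr[i]/arr[j] there.
def revLoop : Nat → Int → Int → List Int → List Int
  | 0, _, _, arr => arr
  | fuel + 1, i, j, arr =>
    if i < j then
      revLoop fuel (i + 1) (j - 1)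
        ((arr.set i.toNat (arr.getD j.toNat 0)).set j.toNat (arr.getD i.toNat 0))
    else arr

def rev (i j : Int) (arr : List Int) : List Int := revLoop (arr.length + 1) i j arr

def solve (A : List Int) (B : List Int) : List (List Int) :=
  (PySem.List.pyRange 0 (B.length : Int) 1).foldl
    (fun acc i =>
      let bi := PySem.List.pyGetD B i 0                       -- B[i] (original int, read before overwrite)
      let rot := PySem.Int.mod bi (A.length : Int)            -- B[i] % len(A); Pre_ excludes len(A)=0 here
      let c := A                                              -- B[i] = A.copy()
      let c := rev 0 ((A.length : Int) - 1) c
      let c := rev 0 ((A.length : Int) - rot - 1) c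
      let c := rev ((A.length : Int) - rot) ((A.length : Int) - 1) c
      acc ++ [c])                                             -- the list cell B[i], written once
    []

-- ===== PORT B =====
def solve_alt (A : List Int) (B : List Int) : List (List Int) :=
  let n := (A.length : Int)
  B.map (fun b =>
    PySem.List.slice A (some (PySem.Int.mod b n)) none ++
    PySem.List.slice A none (some (PySem.Int.mod b n)))

-- ===== PRECONDITION & SPEC =====
-- Pre_ excludes exactly the inputs where Python A raises ZeroDivisionError
-- (A = [] with a nonempty B; with B = [] the loop body never runs and A returns []).
def Pre_solve (A : List Int) (B : List Int) : Prop := A ≠ [] ∨ B = []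
instance (A : List Int) (B : List Int) : Decidable (Pre_solve A B) := by unfold Pre_solve; infer_instance
def pvWitness_solve : List Int × List Int := ([1, 2, 3], [4, -1])

def Spec_solve (A : List Int) (B : List Int) (out : List (List Int)) : Prop := out = solve_alt A B
instance (A : List Int) (B : List Int) (out : List (List Int)) : Decidable (Spec_solve A B out) := by unfold Spec_solve; infer_instance

-- ===== CLAIM (what is proved, stated in full; the proofs are below) =====
def Claim_equal_solve : Prop := ∀ (A : List Int) (B : List Int), Dom_solve A B → Pre_solve A B → Spec_solve A B (solve A B)

-- ===== LEMMAS AND PROOFS =====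

-- revLoop with ¬ i < j is the identity, whatever the fuel.
theorem revLoop_stop (fuel : Nat) (i j : Int) (arr : List Int) (h : ¬ i < j) :
    revLoop fuel i j arr = arr := by
  cases fuel with
  | zero => rfl
  | succ f => simp [revLoop, h]

-- Segment reversal: if arr = t ++ mid ++ d and (i, j) delimit mid, revLoop reverses mid.
theorem revSeg (fuel : Nat) (i j : Int) (arr t mid d : List Int)
    (harr : arr = t ++ mid ++ d) (hf : mid.length ≤ fuel)
    (hi : i = (t.length : Int)) (hj : j = (t.length : Int) + (mid.length : Int) - 1) :
    revLoop fuel i j arr = t ++ mid.reverse ++ d := by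
  induction fuel generalizing i j arr t mid d with
  | zero =>
    have hmid : mid = [] := List.length_eq_zero_iff.mp (by omega)
    subst hmid
    simp [revLoop, harr]
  | succ f ih =>
    by_cases hij : i < j
    · -- at least two elements in mid
      have hlen2 : 2 ≤ mid.length := by omega
      obtain ⟨a, mid1, rfl⟩ : ∃ a mid1, mid = a :: mid1 := by
        cases mid with
        | nil => simp at hlen2
        | cons a mid1 => exact ⟨a, mid1, rfl⟩
      obtain ⟨m, b, rfl⟩ : ∃ m b, mid1 = m ++ [b] := by
        rcases List.eq_nil_or_concat mid1 with h0 | ⟨m, b, h0⟩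
        · subst h0; simp at hlen2
        · exact ⟨m, b, by simpa [List.concat_eq_append] using h0⟩
      subst harr hi hj
      have hmlen : (a :: (m ++ [b])).length = m.length + 2 := by simp
      have e0 : t ++ (a :: (m ++ [b])) ++ d = t ++ a :: (m ++ b :: d) := by simp
      have hiN : ((t.length : Int)).toNat = t.length := by omega
      have hjN : (((t.length : Int) + (((a :: (m ++ [b])).length : Nat) : Int) - 1)).toNat
          = t.length + (m.length + 1) := by rw [hmlen]; omega
      have hgi : (t ++ (a :: (m ++ [b])) ++ d).getD ((t.length : Int)).toNat 0 = a := by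
        rw [hiN, e0, List.getD_eq_getElem?_getD, List.getElem?_append_right (by omega)]
        simp
      have hgj : (t ++ (a :: (m ++ [b])) ++ d).getD
          (((t.length : Int) + (((a :: (m ++ [b])).length : Nat) : Int) - 1)).toNat 0 = b := by
        have e1 : t ++ (a :: (m ++ [b])) ++ d = (t ++ a :: m) ++ b :: d := by simp
        rw [hjN, e1, List.getD_eq_getElem?_getD,
          List.getElem?_append_right (by simp <;> omega)]
        have e2 : t.length + (m.length + 1) - (t ++ a :: m).length = 0 := by simp <;> omega
        rw [e2]; simp
      rw [revLoop, if_pos hij, hgi, hgj, hiN, hjN]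
      have hset : ((t ++ (a :: (m ++ [b])) ++ d).set t.length b).set
          (t.length + (m.length + 1)) a = (t ++ [b]) ++ m ++ (a :: d) := by
        rw [e0]
        rw [List.set_append_right _ _ (by omega)]
        have e3 : t.length - t.length = 0 := by omega
        rw [e3]
        have e4 : t ++ (b :: (m ++ b :: d)).set 0 b ++ [] = (t ++ [b]) ++ (m ++ b :: d) := by simp
        have e5 : t ++ (a :: (m ++ b :: d)).set 0 b = (t ++ [b]) ++ (m ++ b :: d) := by simp
        rw [e5, List.set_append_right _ _ (by simp <;> omega)]
        have e6 : t.length + (m.length + 1) - (t ++ [b]).length = m.length := by simp <;> omega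
        rw [e6, List.set_append_right _ _ (by omega)]
        have e7 : m.length - m.length = 0 := by omega
        rw [e7]
        simp
      rw [hset]
      rw [ih _ _ _ (t ++ [b]) m (a :: d) rfl (by omega)
        (by simp) (by simp <;> omega)]
      simp
    · rw [revLoop_stop _ _ _ _ hij]
      have hm1 : mid.length ≤ 1 := by omega
      match mid, hm1 with
      | [], _ => simp [harr]
      | [x], _ => simp [harr]

-- The three rev calls on a copy of A produce A.drop r ++ A.take r (left rotation by r).
theorem rev3_rotate (A : List Int) (r : Nat) (hr : r ≤ A.length) :
    rev ((A.length : Int) - r) ((A.length : Int) - 1)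
      (rev 0 ((A.length : Int) - r - 1)
        (rev 0 ((A.length : Int) - 1) A))
      = A.drop r ++ A.take r := by
  have s1 : rev 0 ((A.length : Int) - 1) A = A.reverse := by
    have := revSeg (A.length + 1) 0 ((A.length : Int) - 1) A [] A []
      (by simp) (by omega) (by simp) (by simp)
    simpa [rev] using this
  have s2 : rev 0 ((A.length : Int) - r - 1) A.reverse
      = A.drop r ++ (A.take r).reverse := by
    have := revSeg (A.reverse.length + 1) 0 ((A.length : Int) - r - 1) A.reverse
      [] (A.drop r).reverse (A.take r).reverse
      (by simp [← List.reverse_append]) (by simp <;> omega) (by simp)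
      (by simp <;> omega)
    simpa [rev] using this
  have s3 : rev ((A.length : Int) - r) ((A.length : Int) - 1)
      (A.drop r ++ (A.take r).reverse) = A.drop r ++ A.take r := by
    have := revSeg ((A.drop r ++ (A.take r).reverse).length + 1)
      ((A.length : Int) - r) ((A.length : Int) - 1)
      (A.drop r ++ (A.take r).reverse) (A.drop r) ((A.take r).reverse) []
      (by simp) (by simp <;> omega) (by simp <;> omega) (by simp <;> omega)
    simpa [rev] using this
  rw [s1, s2, s3]

-- Each loop-body value equals B's slice-concatenation, for nonempty A.
theorem step_eq (A : List Int) (b : Int) (hA : A ≠ []) :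
    (let rot := PySem.Int.mod b (A.length : Int)
     rev ((A.length : Int) - rot) ((A.length : Int) - 1)
       (rev 0 ((A.length : Int) - rot - 1)
         (rev 0 ((A.length : Int) - 1) A)))
    = PySem.List.slice A (some (PySem.Int.mod b (A.length : Int))) none ++
      PySem.List.slice A none (some (PySem.Int.mod b (A.length : Int))) := by
  have hn : 0 < (A.length : Int) := by
    have := List.length_pos_iff.mpr hA; omega
  set rot := PySem.Int.mod b (A.length : Int) with hrot
  have h0 : 0 ≤ rot := PySem.Int.mod_nonneg b hn
  have h1 : rot < (A.length : Int) := PySem.Int.mod_lt b hn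
  have hcast : rot = ((rot.toNat : Nat) : Int) := by omega
  have hs1 : PySem.List.slice A (some rot) none = A.drop rot.toNat := by
    rw [hcast, PySem.List.slice_from_natCast]; simp only [Int.toNat_natCast]
  have hs2 : PySem.List.slice A none (some rot) = A.take rot.toNat := by
    rw [hcast, PySem.List.slice_to_natCast]; simp only [Int.toNat_natCast]
  rw [hs1, hs2]
  obtain ⟨r, hr⟩ : ∃ r : Nat, rot = (r : Int) := ⟨rot.toNat, by omega⟩
  rw [hr]
  simp only [Int.toNat_natCast]
  exact rev3_rotate A r (by omega)

-- ===== VERDICT (by name: the statement is the Claim_ definition above) =====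
theorem solve_spec : Claim_equal_solve := by
  intro A B _hDom hPre
  unfold Spec_solve solve solve_alt
  rcases hPre with hA | hB
  · rw [PySem.List.foldl_append_singleton_eq_map]
    have hmap : (PySem.List.pyRange 0 (B.length : Int) 1).map (fun i => PySem.List.pyGetD B i 0) = B :=
      PySem.List.map_pyGetD_pyRange_zero' B 0
    calc (PySem.List.pyRange 0 (B.length : Int) 1).map
          (fun i =>
            let bi := PySem.List.pyGetD B i 0
            let rot := PySem.Int.mod bi (A.length : Int)
            rev ((A.length : Int) - rot) ((A.length : Int) - 1)
              (rev 0 ((A.length : Int) - rot - 1) (rev 0 ((A.length : Int) - 1) A)))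
        = ((PySem.List.pyRange 0 (B.length : Int) 1).map (fun i => PySem.List.pyGetD B i 0)).map
            (fun b =>
              let rot := PySem.Int.mod b (A.length : Int)
              rev ((A.length : Int) - rot) ((A.length : Int) - 1)
                (rev 0 ((A.length : Int) - rot - 1) (rev 0 ((A.length : Int) - 1) A))) := by
          rw [List.map_map]; rfl
      _ = B.map (fun b =>
            PySem.List.slice A (some (PySem.Int.mod b (A.length : Int))) none ++
            PySem.List.slice A none (some (PySem.Int.mod b (A.length : Int)))) := by
          rw [hmap]
          exact List.map_congr_left (fun b _ => step_eq A b hA)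
      _ = _ := rfl
  · subst hB; rfl
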